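-- pv_equiv track=rewrite | github.com/JaimeBallesterosCalvo/practica-2 | parte2/nuevaversion.py | pacientesRecoger
-- ===== SOURCE A (Python) =====
-- def pacientesRecoger(datos):
--     #la función recorrera el mapa, guardando la dirección de donde están cada paciente y los hospitales
--     noContagiados= []
--     contagiados=[]
--     hospitalContagiado = []
--     hospitalNoContagiado = []
--     parking = []
--     contadorFila=-1
--     for fila in datos:
--         contadorFila+=1
--         contadorColumna=-1
--         for estado in fila:
--             contadorColumna+=1
--             if estado =="N":
--                 noContagiados.append([contadorFila, contadorColumna])
--             elif estado =="C":
--                 contagiados.append([contadorFila, contadorColumna ])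
--             elif estado =="CC":
--                 hospitalContagiado.append([contadorFila, contadorColumna ])
--             elif estado =="CN":
--                 hospitalNoContagiado.append([contadorFila, contadorColumna ])
--             elif estado == "P":
--                 parking.append([contadorFila, contadorColumna ])
--     totalPacientes=noContagiados+contagiados
--     return totalPacientes, noContagiados, contagiados, hospitalContagiado, hospitalNoContagiado, parking
-- ===== SOURCE B (Python) =====
-- def pacientesRecoger(datos):
--     # Five separate row-major comprehension scans, one per cell state.
--     noContagiados = [[i, j] for i, fila in enumerate(datos) for j, e in enumerate(fila) if e == "N"]
--     contagiados = [[i, j] for i, fila in enumerate(datos) for j, e in enumerate(fila) if e == "C"]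
--     hospitalContagiado = [[i, j] for i, fila in enumerate(datos) for j, e in enumerate(fila) if e == "CC"]
--     hospitalNoContagiado = [[i, j] for i, fila in enumerate(datos) for j, e in enumerate(fila) if e == "CN"]
--     parking = [[i, j] for i, fila in enumerate(datos) for j, e in enumerate(fila) if e == "P"]
--     return noContagiados + contagiados, noContagiados, contagiados, hospitalContagiado, hospitalNoContagiado, parking
-- ===== Notes on version B (the rewrite author's own statement) =====
-- stated objective: simpler
-- what changed: Replaced the single stateful nested loop with manual counters and an if/elif chain by five independent row-major comprehension scans, one per cell state, with totalPacientes obtained as noContagiados + contagiados.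
import Mathlib
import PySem

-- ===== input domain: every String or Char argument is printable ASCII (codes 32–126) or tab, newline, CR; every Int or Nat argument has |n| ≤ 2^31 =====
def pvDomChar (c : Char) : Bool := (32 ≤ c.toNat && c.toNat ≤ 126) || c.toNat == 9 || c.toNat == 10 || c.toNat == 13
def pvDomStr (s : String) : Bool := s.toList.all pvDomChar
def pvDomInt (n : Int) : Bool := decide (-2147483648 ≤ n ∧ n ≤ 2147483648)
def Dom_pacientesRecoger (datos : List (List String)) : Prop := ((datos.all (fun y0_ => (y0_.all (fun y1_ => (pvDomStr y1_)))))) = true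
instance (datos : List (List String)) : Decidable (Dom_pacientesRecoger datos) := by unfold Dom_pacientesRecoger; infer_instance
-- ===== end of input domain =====

-- B replaces A's single stateful nested loop (manual counters + if/elif chain) by five
-- independent row-major comprehension scans, one per cell state (objective: simpler).

-- ===== PORT A =====
-- accumulator: the five lists (noContagiados, contagiados, hospitalContagiado, hospitalNoContagiado, parking)
abbrev PacAcc := List (List Int) × List (List Int) × List (List Int) × List (List Int) × List (List Int)

-- body of the inner 'for estado in fila' loop; state = (contadorColumna, the five lists)
def pacStep (cf : Int) (st : Int × PacAcc) (estado : String) : Int × PacAcc :=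
  let cc := st.1 + 1
  match st.2 with
  | (nc, c, hc, hn, p) =>
    if estado == "N" then (cc, (nc ++ [[cf, cc]], c, hc, hn, p))
    else if estado == "C" then (cc, (nc, c ++ [[cf, cc]], hc, hn, p))
    else if estado == "CC" then (cc, (nc, c, hc ++ [[cf, cc]], hn, p))
    else if estado == "CN" then (cc, (nc, c, hc, hn ++ [[cf, cc]], p))
    else if estado == "P" then (cc, (nc, c, hc, hn, p ++ [[cf, cc]]))
    else (cc, (nc, c, hc, hn, p))

-- body of the outer 'for fila in datos' loop; state = (contadorFila, the five lists)
def pacRow (st : Int × PacAcc) (fila : List String) : Int × PacAcc :=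
  let cf := st.1 + 1
  (cf, (fila.foldl (pacStep cf) (-1, st.2)).2)

def pacientesRecoger (datos : List (List String)) : List (List Int) × List (List Int) × List (List Int) × List (List Int) × List (List Int) × List (List Int) :=
  let st := datos.foldl pacRow (-1, ([], [], [], [], []))
  match st.2 with
  | (nc, c, hc, hn, p) => (nc ++ c, nc, c, hc, hn, p)

-- ===== PORT B =====
-- one comprehension [[i, j] for i, fila in enumerate(datos) for j, e in enumerate(fila) if e == s]
def pacSel (datos : List (List String)) (s : String) : List (List Int) :=
  (PySem.List.enumerate datos 0).flatMap (fun pr =>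
    ((PySem.List.enumerate pr.2 0).filter (fun q => q.2 == s)).map (fun q => [pr.1, q.1]))

def pacientesRecoger_alt (datos : List (List String)) : List (List Int) × List (List Int) × List (List Int) × List (List Int) × List (List Int) × List (List Int) :=
  let noContagiados := pacSel datos "N"
  let contagiados := pacSel datos "C"
  let hospitalContagiado := pacSel datos "CC"
  let hospitalNoContagiado := pacSel datos "CN"
  let parking := pacSel datos "P"
  (noContagiados ++ contagiados, noContagiados, contagiados, hospitalContagiado, hospitalNoContagiado, parking)

-- ===== PRECONDITION & SPEC =====
def Spec_pacientesRecoger (datos : List (List String)) (out : List (List Int) × List (List Int) × List (List Int) × List (List Int) × List (List Int) × List (List Int)) : Prop := out = pacientesRecoger_alt datos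
instance (datos : List (List String)) (out : List (List Int) × List (List Int) × List (List Int) × List (List Int) × List (List Int) × List (List Int)) : Decidable (Spec_pacientesRecoger datos out) := by
  unfold Spec_pacientesRecoger
  have h : DecidableEq (List (List Int)) := inferInstance
  exact @instDecidableEqProd _ _ h (@instDecidableEqProd _ _ h (@instDecidableEqProd _ _ h (@instDecidableEqProd _ _ h (@instDecidableEqProd _ _ h h)))) _ _

-- ===== CLAIM (what is proved, stated in full; the proofs are below) =====
def Claim_equal_pacientesRecoger : Prop := ∀ (datos : List (List String)), Dom_pacientesRecoger datos → Spec_pacientesRecoger datos (pacientesRecoger datos)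

-- ===== LEMMAS AND PROOFS =====

-- per-row selection starting the column enumeration at j
def rsel (cf : Int) (fila : List String) (j : Int) (s : String) : List (List Int) :=
  ((PySem.List.enumerate fila j).filter (fun q => q.2 == s)).map (fun q => [cf, q.1])

-- whole-grid selection starting the row enumeration at i
def gsel (datos : List (List String)) (i : Int) (s : String) : List (List Int) :=
  (PySem.List.enumerate datos i).flatMap (fun pr => rsel pr.1 pr.2 0 s)

lemma gsel_zero (datos : List (List String)) (s : String) : gsel datos 0 s = pacSel datos s := rfl

lemma rsel_nil (cf j : Int) (s : String) : rsel cf [] j s = [] := rfl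

lemma rsel_cons (cf : Int) (e : String) (rest : List String) (j : Int) (s : String) :
    rsel cf (e :: rest) j s = (if e == s then [[cf, j]] else []) ++ rsel cf rest (j + 1) s := by
  simp only [rsel, PySem.List.enumerate_cons, List.filter_cons]
  by_cases h : e = s <;> simp [h]

lemma rowA (fila : List String) : ∀ (cf j : Int) (nc c hc hn p : List (List Int)),
    fila.foldl (pacStep cf) (j, (nc, c, hc, hn, p)) =
      (j + fila.length,
       (nc ++ rsel cf fila (j + 1) "N", c ++ rsel cf fila (j + 1) "C",
        hc ++ rsel cf fila (j + 1) "CC", hn ++ rsel cf fila (j + 1) "CN",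
        p ++ rsel cf fila (j + 1) "P")) := by
  induction fila with
  | nil => intro cf j nc c hc hn p; simp [rsel_nil]
  | cons e rest ih =>
    intro cf j nc c hc hn p
    simp only [List.foldl_cons]
    rw [show pacStep cf (j, (nc, c, hc, hn, p)) e =
        (j + 1, (nc ++ (if e == "N" then [[cf, j + 1]] else []),
                 c ++ (if e == "C" then [[cf, j + 1]] else []),
                 hc ++ (if e == "CC" then [[cf, j + 1]] else []),
                 hn ++ (if e == "CN" then [[cf, j + 1]] else []),
                 p ++ (if e == "P" then [[cf, j + 1]] else []))) from by
      simp only [pacStep]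
      split_ifs <;> simp_all]
    rw [ih]
    simp [rsel_cons, List.append_assoc]
    omega

lemma gsel_cons (fila : List String) (rest : List (List String)) (i : Int) (s : String) :
    gsel (fila :: rest) i s = rsel i fila 0 s ++ gsel rest (i + 1) s := by
  simp [gsel, PySem.List.enumerate_cons]

lemma outerA (datos : List (List String)) : ∀ (i : Int) (nc c hc hn p : List (List Int)),
    datos.foldl pacRow (i, (nc, c, hc, hn, p)) =
      (i + datos.length,
       (nc ++ gsel datos (i + 1) "N", c ++ gsel datos (i + 1) "C",
        hc ++ gsel datos (i + 1) "CC", hn ++ gsel datos (i + 1) "CN",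
        p ++ gsel datos (i + 1) "P")) := by
  induction datos with
  | nil => intro i nc c hc hn p; simp [gsel]
  | cons fila rest ih =>
    intro i nc c hc hn p
    simp only [List.foldl_cons]
    have hrow : pacRow (i, (nc, c, hc, hn, p)) fila =
        (i + 1, (nc ++ rsel (i + 1) fila 0 "N", c ++ rsel (i + 1) fila 0 "C",
                 hc ++ rsel (i + 1) fila 0 "CC", hn ++ rsel (i + 1) fila 0 "CN",
                 p ++ rsel (i + 1) fila 0 "P")) := by
      simp only [pacRow, rowA]
      norm_num
    rw [hrow, ih]
    simp [gsel_cons, List.append_assoc]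
    omega

theorem pacientesRecoger_spec : Claim_equal_pacientesRecoger := by
  intro datos _
  unfold Spec_pacientesRecoger pacientesRecoger pacientesRecoger_alt
  rw [outerA]
  simp [gsel_zero]
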